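-- pv_equiv track=rewrite | github.com/wilson-gvrsf/Sentinel | NDTI.py | get_seasonal_date_ranges
-- ===== SOURCE A (Python) =====
-- def get_seasonal_date_ranges(years, exclude_winter_summer=True):
--     """
--     Generate seasonal date ranges excluding winter and summer periods
--
--     Args:
--         years (list): List of years to process
--         exclude_winter_summer (bool): If True, only include spring and autumn
--
--     Returns:
--         dict: Dictionary with season names as keys and date ranges as values
--     """
--     seasonal_ranges = {}
--
--     for year in years:
--         year = int(year)
--
--         if exclude_winter_summer:
--             # Spring: March-May (month 3-5)
--             seasonal_ranges[f'Spring_{year}'] = [f'{year}-03-01', f'{year}-05-31']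
--             # Autumn: September-November (month 9-11)
--             seasonal_ranges[f'Autumn_{year}'] = [f'{year}-09-01', f'{year}-11-30']
--         else:
--             # Include all seasons
--             seasonal_ranges[f'Spring_{year}'] = [f'{year}-03-01', f'{year}-05-31']
--             seasonal_ranges[f'Summer_{year}'] = [f'{year}-06-01', f'{year}-08-31']
--             seasonal_ranges[f'Autumn_{year}'] = [f'{year}-09-01', f'{year}-11-30']
--             seasonal_ranges[f'Winter_{year}'] = [f'{year}-12-01', f'{year+1}-02-28']
--
--     return seasonal_ranges
-- ===== SOURCE B (Python) =====
-- # (prefix of the dict key, start-date suffix, end-date suffix, year offset for the end date)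
-- SEASONS = [
--     ("Spring_", "-03-01", "-05-31", 0),
--     ("Summer_", "-06-01", "-08-31", 0),
--     ("Autumn_", "-09-01", "-11-30", 0),
--     ("Winter_", "-12-01", "-02-28", 1),
-- ]
--
-- def get_seasonal_date_ranges(years, exclude_winter_summer=True):
--     if exclude_winter_summer:
--         seasons = [s for s in SEASONS if s[0] in ("Spring_", "Autumn_")]
--     else:
--         seasons = SEASONS
--     out = {}
--     for year in years:
--         y = int(year)
--         for prefix, start, end, off in seasons:
--             out[f'{prefix}{y}'] = [f'{y}{start}', f'{y + off}{end}']
--     return out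
-- ===== Notes on version B (the rewrite author's own statement) =====
-- stated objective: simpler
-- what changed: Replaces A's duplicated per-branch inline dict assignments with a data-driven season-descriptor table filtered once, then a generic nested loop over years x descriptors.
import Mathlib
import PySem

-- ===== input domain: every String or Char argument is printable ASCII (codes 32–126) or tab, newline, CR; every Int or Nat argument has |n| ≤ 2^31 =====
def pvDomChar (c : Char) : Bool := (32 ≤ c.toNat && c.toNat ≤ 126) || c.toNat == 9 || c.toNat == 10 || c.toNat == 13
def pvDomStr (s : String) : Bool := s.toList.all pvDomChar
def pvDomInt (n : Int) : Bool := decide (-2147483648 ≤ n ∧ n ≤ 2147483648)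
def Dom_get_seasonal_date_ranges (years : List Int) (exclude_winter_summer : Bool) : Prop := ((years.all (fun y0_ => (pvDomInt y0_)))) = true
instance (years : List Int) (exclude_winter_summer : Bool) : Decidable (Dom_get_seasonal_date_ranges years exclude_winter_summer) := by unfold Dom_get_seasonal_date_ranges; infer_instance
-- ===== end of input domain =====

-- ===== PORT A =====
def get_seasonal_date_ranges (years : List Int) (exclude_winter_summer : Bool) : List (String × List String) :=
  (years.foldl (fun d year0 =>
    let year := year0  -- int(year) is the identity on an Int
    if exclude_winter_summer then
      ((d.insert ("Spring_" ++ PySem.Int.toStr year) [PySem.Int.toStr year ++ "-03-01", PySem.Int.toStr year ++ "-05-31"]).insert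
        ("Autumn_" ++ PySem.Int.toStr year) [PySem.Int.toStr year ++ "-09-01", PySem.Int.toStr year ++ "-11-30"])
    else
      ((((d.insert ("Spring_" ++ PySem.Int.toStr year) [PySem.Int.toStr year ++ "-03-01", PySem.Int.toStr year ++ "-05-31"]).insert
        ("Summer_" ++ PySem.Int.toStr year) [PySem.Int.toStr year ++ "-06-01", PySem.Int.toStr year ++ "-08-31"]).insert
        ("Autumn_" ++ PySem.Int.toStr year) [PySem.Int.toStr year ++ "-09-01", PySem.Int.toStr year ++ "-11-30"]).insert
        ("Winter_" ++ PySem.Int.toStr year) [PySem.Int.toStr year ++ "-12-01", PySem.Int.toStr (year + 1) ++ "-02-28"]))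
    (PySem.Dict.empty : PySem.Dict String (List String))).items

-- ===== PORT B =====
def pvSEASONS : List (String × String × String × Int) :=
  [("Spring_", "-03-01", "-05-31", 0), ("Summer_", "-06-01", "-08-31", 0),
   ("Autumn_", "-09-01", "-11-30", 0), ("Winter_", "-12-01", "-02-28", 1)]

def get_seasonal_date_ranges_alt (years : List Int) (exclude_winter_summer : Bool) : List (String × List String) :=
  let seasons := if exclude_winter_summer
    then pvSEASONS.filter (fun s => s.1 == "Spring_" || s.1 == "Autumn_")
    else pvSEASONS
  (years.foldl (fun d year =>
    let y := year  -- int(year) is the identity on an Int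
    seasons.foldl (fun d s =>
      d.insert (s.1 ++ PySem.Int.toStr y)
        [PySem.Int.toStr y ++ s.2.1, PySem.Int.toStr (y + s.2.2.2) ++ s.2.2.1]) d)
    (PySem.Dict.empty : PySem.Dict String (List String))).items

-- ===== PRECONDITION & SPEC =====
def Spec_get_seasonal_date_ranges (years : List Int) (exclude_winter_summer : Bool) (out : List (String × List String)) : Prop := out = get_seasonal_date_ranges_alt years exclude_winter_summer
instance (years : List Int) (exclude_winter_summer : Bool) (out : List (String × List String)) : Decidable (Spec_get_seasonal_date_ranges years exclude_winter_summer out) := by unfold Spec_get_seasonal_date_ranges; infer_instance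

-- ===== CLAIM (what is proved, stated in full; the proofs are below) =====
def Claim_equal_get_seasonal_date_ranges : Prop := ∀ (years : List Int) (exclude_winter_summer : Bool), Dom_get_seasonal_date_ranges years exclude_winter_summer → Spec_get_seasonal_date_ranges years exclude_winter_summer (get_seasonal_date_ranges years exclude_winter_summer)

-- ===== LEMMAS AND PROOFS =====

-- ===== VERDICT (by name: the statement is the Claim_ definition above) =====
lemma pv_step_eq (e : Bool) (d : PySem.Dict String (List String)) (y : Int) :
    (if e then
      ((d.insert ("Spring_" ++ PySem.Int.toStr y) [PySem.Int.toStr y ++ "-03-01", PySem.Int.toStr y ++ "-05-31"]).insert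
        ("Autumn_" ++ PySem.Int.toStr y) [PySem.Int.toStr y ++ "-09-01", PySem.Int.toStr y ++ "-11-30"])
    else
      ((((d.insert ("Spring_" ++ PySem.Int.toStr y) [PySem.Int.toStr y ++ "-03-01", PySem.Int.toStr y ++ "-05-31"]).insert
        ("Summer_" ++ PySem.Int.toStr y) [PySem.Int.toStr y ++ "-06-01", PySem.Int.toStr y ++ "-08-31"]).insert
        ("Autumn_" ++ PySem.Int.toStr y) [PySem.Int.toStr y ++ "-09-01", PySem.Int.toStr y ++ "-11-30"]).insert
        ("Winter_" ++ PySem.Int.toStr y) [PySem.Int.toStr y ++ "-12-01", PySem.Int.toStr (y + 1) ++ "-02-28"]))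
    =
    (if e then pvSEASONS.filter (fun s => s.1 == "Spring_" || s.1 == "Autumn_") else pvSEASONS).foldl
      (fun d s => d.insert (s.1 ++ PySem.Int.toStr y)
        [PySem.Int.toStr y ++ s.2.1, PySem.Int.toStr (y + s.2.2.2) ++ s.2.2.1]) d := by
  cases e <;> simp [pvSEASONS]

theorem get_seasonal_date_ranges_spec : Claim_equal_get_seasonal_date_ranges := by
  intro years e _
  unfold Spec_get_seasonal_date_ranges get_seasonal_date_ranges get_seasonal_date_ranges_alt
  refine congrArg PySem.Dict.items ?_
  exact List.foldl_ext _ _ _ (fun d y _ => pv_step_eq e d y)
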